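-- pv_equiv track=rewrite | github.com/dominic-source/AirBnB_clone | console.py | splitmodify
-- ===== SOURCE A (Python) =====
-- def splitmodify(args):
--     """merge strings together and return and array of strings"""
--     start = 0
--     newArr = []
--     if ("\'" not in args) and ("\"" not in args):
--         return args.split()
--     else:
--         values = args.split()
--         while (start < len(values)):
--             if values[start].startswith('\"'):
--                 for i in range(start, len(values)):
--                     if values[i].endswith('\"'):
--                         newArr.append(' '.join(values[start:i+1])[1:-1])
--                         break
--                     elif i == (len(values) - 1):
--                         if not (values[i].endswith('\"')):
--                             newArr.append(' '.join(values[start:i+1])[1:])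
--                 start = i
--             elif values[start].endswith('\"'):
--                 newArr.append(values[start][:-1])
--             else:
--                 newArr.append(values[start])
--             start += 1
--     return newArr
-- ===== SOURCE B (Python) =====
-- def splitmodify(args):
--     """merge strings together and return and array of strings"""
--     if ("'" not in args) and ('"' not in args):
--         return args.split()
--     out = []
--     buf = None
--     for tok in args.split():
--         if buf is None:
--             if tok.startswith('"') and tok.endswith('"'):
--                 out.append(tok[1:-1])
--             elif tok.startswith('"'):
--                 buf = [tok]
--             elif tok.endswith('"'):
--                 out.append(tok[:-1])
--             else:
--                 out.append(tok)
--         else: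
--             buf.append(tok)
--             if tok.endswith('"'):
--                 out.append(' '.join(buf)[1:-1])
--                 buf = None
--     if buf is not None:
--         out.append(' '.join(buf)[1:])
--     return out
-- ===== Notes on version B (the rewrite author's own statement) =====
-- stated objective: simpler
-- what changed: Replaces A's while-loop with index jumps and a nested lookahead for-loop over values[start:] by a single forward pass over the tokens with an in-quote buffer (state machine), keeping A's early return when the string has no quote characters.
import Mathlib
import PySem

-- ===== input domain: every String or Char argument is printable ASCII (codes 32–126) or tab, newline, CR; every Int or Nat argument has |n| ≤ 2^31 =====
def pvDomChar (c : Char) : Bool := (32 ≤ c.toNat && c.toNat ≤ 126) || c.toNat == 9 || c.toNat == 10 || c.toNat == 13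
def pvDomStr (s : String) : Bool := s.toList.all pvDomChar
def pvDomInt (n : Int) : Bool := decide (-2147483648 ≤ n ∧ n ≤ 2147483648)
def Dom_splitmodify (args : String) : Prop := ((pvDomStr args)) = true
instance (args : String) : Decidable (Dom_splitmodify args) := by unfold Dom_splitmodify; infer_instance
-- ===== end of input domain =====

-- B replaces A's index-jumping while loop with nested lookahead by a single forward pass
-- with an in-quote buffer; same return value (objective: simpler).

-- ===== PORT A =====
-- shared thin string helpers (s[1:-1], s[1:], s[:-1], startswith/endswith '"', ' '.join)
def pvMid (s : String) : String := PySem.Str.slice s (some 1) (some (-1))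
def pvTail (s : String) : String := PySem.Str.slice s (some 1) none
def pvInit (s : String) : String := PySem.Str.slice s none (some (-1))
def pvSw (t : String) : Bool := PySem.Str.startswith t "\""
def pvEw (t : String) : Bool := PySem.Str.endswith t "\""
def pvJoin (l : List String) : String := PySem.Str.join " " l

-- the inner 'for i in range(start, len(values))' lookahead: returns (appended string, final i)
def pvAInner (values : List String) (start i : Nat) : String × Nat :=
  if pvEw (values.getD i "") then
    (pvMid (pvJoin (PySem.List.slice values (some (start : Int)) (some ((i + 1 : Nat) : Int)))), i)
  else if _h : i + 1 < values.length then
    pvAInner values start (i + 1)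
  else
    (pvTail (pvJoin (PySem.List.slice values (some (start : Int)) (some ((i + 1 : Nat) : Int)))), i)
termination_by values.length - i

-- the final i of the inner loop never moves backwards (used for termination of the outer loop)
theorem pvAInner_le (values : List String) (start i : Nat) : i ≤ (pvAInner values start i).2 := by
  unfold pvAInner
  split
  · simp
  · split
    · have := pvAInner_le values start (i + 1); omega
    · simp
termination_by values.length - i

-- the outer 'while start < len(values)' loop
def pvALoop (values : List String) (start : Nat) (acc : List String) : List String :=
  if _h : start < values.length then
    if pvSw (values.getD start "") then
      let r := pvAInner values start start
      pvALoop values (r.2 + 1) (acc ++ [r.1])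
    else if pvEw (values.getD start "") then
      pvALoop values (start + 1) (acc ++ [pvInit (values.getD start "")])
    else
      pvALoop values (start + 1) (acc ++ [values.getD start ""])
  else acc
termination_by values.length - start
decreasing_by
  · have := pvAInner_le values start start; omega
  · omega
  · omega

def splitmodify (args : String) : List String :=
  if !PySem.Str.isIn "'" args && !PySem.Str.isIn "\"" args then
    PySem.Str.split₀ args
  else
    pvALoop (PySem.Str.split₀ args) 0 []

-- ===== PORT B =====
-- single forward pass: buf = none outside a quoted span, some buffer inside one
def pvBLoop (toks : List String) (buf : Option (List String)) (out : List String) : List String :=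
  match toks, buf with
  | [], none => out
  | [], some b => out ++ [pvTail (pvJoin b)]
  | t :: rest, none =>
    if pvSw t && pvEw t then pvBLoop rest none (out ++ [pvMid t])
    else if pvSw t then pvBLoop rest (some [t]) out
    else if pvEw t then pvBLoop rest none (out ++ [pvInit t])
    else pvBLoop rest none (out ++ [t])
  | t :: rest, some b =>
    if pvEw t then pvBLoop rest none (out ++ [pvMid (pvJoin (b ++ [t]))])
    else pvBLoop rest (some (b ++ [t])) out

def splitmodify_alt (args : String) : List String :=
  if !PySem.Str.isIn "'" args && !PySem.Str.isIn "\"" args then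
    PySem.Str.split₀ args
  else
    pvBLoop (PySem.Str.split₀ args) none []

-- ===== PRECONDITION & SPEC =====
def Spec_splitmodify (args : String) (out : List String) : Prop := out = splitmodify_alt args
instance (args : String) (out : List String) : Decidable (Spec_splitmodify args out) := by unfold Spec_splitmodify; infer_instance

-- ===== CLAIM (what is proved, stated in full; the proofs are below) =====
def Claim_equal_splitmodify : Prop := ∀ (args : String), Dom_splitmodify args → Spec_splitmodify args (splitmodify args)

-- ===== LEMMAS AND PROOFS =====

-- ' '.join of a single token is the token
theorem pvJoin_singleton (v : String) : pvJoin [v] = v := by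
  have h1 : (pvJoin [v]).toList = v.toList := by
    simp [pvJoin, PySem.Chars.join_singleton]
  exact String.toList_inj.mp h1

-- the slice values[start:i+1] is B's buffer extended by values[i]
theorem pv_take_ext (l : List String) (s i : Nat) (hs : s ≤ i) (hi : i < l.length) :
    (l.drop s).take (i - s) ++ [l[i]] = (l.drop s).take (i + 1 - s) := by
  have h1 : i + 1 - s = (i - s) + 1 := by omega
  have h2 : (l.drop s)[i - s]? = some l[i] := by
    rw [List.getElem?_drop]
    have h3 : s + (i - s) = i := by omega
    rw [h3, List.getElem?_eq_getElem hi]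
  rw [h1, List.take_add_one, h2]
  rfl

theorem pv_slice_eq (l : List String) (s k : Nat) :
    PySem.List.slice l (some (s : Int)) (some ((k : Nat) : Int)) = (l.drop s).take (k - s) :=
  PySem.List.slice_natCast l s k

-- the slice l[s:i+1] in buffer form
theorem pv_slice_succ (l : List String) (s i : Nat) (hs : s ≤ i) (hi : i < l.length) :
    PySem.List.slice l (some (s : Int)) (some ((i + 1 : Nat) : Int))
      = (l.drop s).take (i - s) ++ [l[i]] := by
  rw [pv_slice_eq, pv_take_ext l s i hs hi]

-- the inner lookahead of A corresponds to B's buffered scan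
theorem pv_inner_eq (values : List String) (start i : Nat) (out : List String)
    (hsi : start ≤ i) (hi : i < values.length) :
    pvBLoop (values.drop i) (some ((values.drop start).take (i - start))) out
      = pvBLoop (values.drop ((pvAInner values start i).2 + 1)) none
          (out ++ [(pvAInner values start i).1]) := by
  have hget : values.getD i "" = values[i] := List.getD_eq_getElem values "" hi
  have hdrop : values.drop i = values[i] :: values.drop (i + 1) := List.drop_eq_getElem_cons hi
  by_cases hew : pvEw values[i] = true
  · have hA : pvAInner values start i
        = (pvMid (pvJoin (PySem.List.slice values (some (start : Int)) (some ((i + 1 : Nat) : Int)))), i) := by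
      conv_lhs => rw [pvAInner]
      rw [hget, if_pos hew]
    rw [hA, pv_slice_succ values start i hsi hi, hdrop]
    simp [pvBLoop, hew]
  · by_cases hlt : i + 1 < values.length
    · have hA : pvAInner values start i = pvAInner values start (i + 1) := by
        conv_lhs => rw [pvAInner]
        rw [hget, if_neg hew, dif_pos hlt]
      rw [hA, hdrop]
      have hstep : pvBLoop (values[i] :: values.drop (i + 1))
            (some ((values.drop start).take (i - start))) out
          = pvBLoop (values.drop (i + 1))
            (some ((values.drop start).take (i - start) ++ [values[i]])) out := by
        simp [pvBLoop, hew]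
      rw [hstep, pv_take_ext values start i hsi hi]
      exact pv_inner_eq values start (i + 1) out (by omega) hlt
    · have hA : pvAInner values start i
          = (pvTail (pvJoin (PySem.List.slice values (some (start : Int)) (some ((i + 1 : Nat) : Int)))), i) := by
        conv_lhs => rw [pvAInner]
        rw [hget, if_neg hew, dif_neg hlt]
      rw [hA, pv_slice_succ values start i hsi hi, hdrop]
      have hnil : values.drop (i + 1) = [] := List.drop_eq_nil_of_le (by omega)
      rw [hnil]
      simp [pvBLoop, hew]
termination_by values.length - i

-- A's outer loop equals B's pass on the remaining tokens
theorem pv_loop_eq (values : List String) (start : Nat) (out : List String) :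
    pvALoop values start out = pvBLoop (values.drop start) none out := by
  by_cases h : start < values.length
  · have hget : values.getD start "" = values[start] := List.getD_eq_getElem values "" h
    have hdrop : values.drop start = values[start] :: values.drop (start + 1) :=
      List.drop_eq_getElem_cons h
    by_cases hsw : pvSw values[start] = true
    · by_cases hew : pvEw values[start] = true
      · -- token both opens and closes a span
        have hA : pvAInner values start start
            = (pvMid (pvJoin (PySem.List.slice values (some (start : Int)) (some ((start + 1 : Nat) : Int)))), start) := by
          conv_lhs => rw [pvAInner]
          rw [hget, if_pos hew]
        have hsl : PySem.List.slice values (some (start : Int)) (some ((start + 1 : Nat) : Int))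
            = [values[start]] := by
          rw [pv_slice_succ values start start (le_refl _) h]
          simp
        unfold pvALoop
        rw [dif_pos h, hget, if_pos hsw, hA]
        rw [hdrop]
        simp only [pvBLoop, hsw, hew, Bool.and_self, if_pos]
        rw [hsl, pvJoin_singleton]
        exact pv_loop_eq values (start + 1) (out ++ [pvMid values[start]])
      · -- token opens a span
        unfold pvALoop
        rw [dif_pos h, hget, if_pos hsw, hdrop]
        have hBfirst : pvBLoop (values[start] :: values.drop (start + 1)) none out
            = pvBLoop (values.drop (start + 1)) (some [values[start]]) out := by
          simp [pvBLoop, hsw, hew]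
        rw [hBfirst]
        by_cases hlt : start + 1 < values.length
        · have hA : pvAInner values start start = pvAInner values start (start + 1) := by
            conv_lhs => rw [pvAInner]
            rw [hget, if_neg hew, dif_pos hlt]
          have hbuf : (values.drop start).take (start + 1 - start) = [values[start]] := by
            rw [← pv_take_ext values start start (le_refl _) h]
            simp
          have hin := pv_inner_eq values start (start + 1) out (by omega) hlt
          rw [hbuf] at hin
          rw [hA, hin]
          have hge := pvAInner_le values start (start + 1)
          exact pv_loop_eq values ((pvAInner values start (start + 1)).2 + 1) _
        · have hA : pvAInner values start start
              = (pvTail (pvJoin (PySem.List.slice values (some (start : Int)) (some ((start + 1 : Nat) : Int)))), start) := by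
            conv_lhs => rw [pvAInner]
            rw [hget, if_neg hew, dif_neg hlt]
          have hsl : PySem.List.slice values (some (start : Int)) (some ((start + 1 : Nat) : Int))
              = [values[start]] := by
            rw [pv_slice_succ values start start (le_refl _) h]
            simp
          have hnil : values.drop (start + 1) = [] := List.drop_eq_nil_of_le (by omega)
          rw [hA, hnil, hsl]
          have hend : pvALoop values (start + 1) (out ++ [pvTail (pvJoin [values[start]])]) =
              out ++ [pvTail (pvJoin [values[start]])] := by
            unfold pvALoop; rw [dif_neg (by omega)]
          rw [hend]
          simp [pvBLoop]
    · unfold pvALoop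
      rw [dif_pos h, hget, if_neg hsw, hdrop]
      by_cases hew : pvEw values[start] = true
      · rw [if_pos hew]
        have : pvBLoop (values[start] :: values.drop (start + 1)) none out
            = pvBLoop (values.drop (start + 1)) none (out ++ [pvInit values[start]]) := by
          simp [pvBLoop, hsw, hew]
        rw [this]
        exact pv_loop_eq values (start + 1) _
      · rw [if_neg hew]
        have : pvBLoop (values[start] :: values.drop (start + 1)) none out
            = pvBLoop (values.drop (start + 1)) none (out ++ [values[start]]) := by
          simp [pvBLoop, hsw, hew]
        rw [this]
        exact pv_loop_eq values (start + 1) _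
  · have hnil : values.drop start = [] := List.drop_eq_nil_of_le (by omega)
    unfold pvALoop
    rw [dif_neg h, hnil]
    rfl
termination_by values.length - start
decreasing_by
  · omega
  · have := pvAInner_le values start (start + 1); omega
  · omega
  · omega

-- ===== VERDICT (by name: the statement is the Claim_ definition above) =====
theorem splitmodify_spec : Claim_equal_splitmodify := by
  intro args _hdom
  unfold Spec_splitmodify splitmodify splitmodify_alt
  split
  · rfl
  · simpa using pv_loop_eq (PySem.Str.split₀ args) 0 []
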